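-- pv_equiv track=rewrite | github.com/MaidariTs/algorithms-templates | python/final_ex/sleightofhands.py | sleight_of_hand
-- ===== SOURCE A (Python) =====
-- def sleight_of_hand(k: int, matrix: str) -> int:
--     k = k*2
--     dict_count = {}
--     count = 0
--     for i in matrix:
--         if i in dict_count:
--             dict_count[i] += 1
--         else:
--             dict_count[i] = 1
--     val = list(dict_count.values())
--     for i in range(len(val)):
--         if val[i] <= k:
--             count += 1
--     return count
-- ===== SOURCE B (Python) =====
-- def sleight_of_hand(k: int, matrix: str) -> int:
--     # sort-then-scan: count runs of equal chars in sorted order; no frequency dict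
--     limit = 2 * k
--     count = 0
--     run = 0
--     prev = ' '
--     for c in sorted(matrix):
--         if run > 0 and c == prev:
--             run += 1
--         else:
--             if run > 0 and run <= limit:
--                 count += 1
--             prev = c
--             run = 1
--     if run > 0 and run <= limit:
--         count += 1
--     return count
-- ===== Notes on version B (the rewrite author's own statement) =====
-- stated objective: alternative
-- what changed: replaced A's hash-map frequency pass plus values scan with sorting the string and counting consecutive equal-character runs of length <= 2k in one scan, with no dictionary
import Mathlib
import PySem

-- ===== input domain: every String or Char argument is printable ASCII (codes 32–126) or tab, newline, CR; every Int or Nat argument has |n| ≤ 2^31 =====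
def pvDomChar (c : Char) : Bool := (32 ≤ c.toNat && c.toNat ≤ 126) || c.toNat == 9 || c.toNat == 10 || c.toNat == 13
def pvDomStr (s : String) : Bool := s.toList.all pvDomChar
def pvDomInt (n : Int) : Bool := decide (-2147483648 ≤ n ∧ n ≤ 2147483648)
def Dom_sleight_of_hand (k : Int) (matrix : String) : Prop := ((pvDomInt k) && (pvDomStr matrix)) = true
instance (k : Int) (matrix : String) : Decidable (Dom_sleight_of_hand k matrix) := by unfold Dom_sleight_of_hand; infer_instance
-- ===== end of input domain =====

-- B replaces A's frequency dictionary with a sort-then-scan counting of equal-char runs (alternative decomposition, same result).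

-- ===== PORT A =====
def sleight_of_hand (k : Int) (matrix : String) : Int :=
  let k2 := k * 2
  let dict_count : PySem.Dict Char Int := matrix.toList.foldl
    (fun d i => if d.contains i then d.modify i 0 (· + 1) else d.insert i 1)
    PySem.Dict.empty
  let val := dict_count.values
  (PySem.List.pyRange 0 (PySem.List.len val)).foldl
    (fun count i => if PySem.List.pyGetD val i 0 ≤ k2 then count + 1 else count) 0

-- ===== PORT B =====
-- state is (count, run, prev); 'run = 0' encodes Python's initial prev sentinel phase
def shobStep (limit : Int) (st : Int × Int × Char) (c : Char) : Int × Int × Char :=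
  if 0 < st.2.1 ∧ c = st.2.2 then (st.1, st.2.1 + 1, st.2.2)
  else (if 0 < st.2.1 ∧ st.2.1 ≤ limit then st.1 + 1 else st.1, 1, c)

def shobFinish (limit : Int) (st : Int × Int × Char) : Int :=
  if 0 < st.2.1 ∧ st.2.1 ≤ limit then st.1 + 1 else st.1

def sleight_of_hand_alt (k : Int) (matrix : String) : Int :=
  let limit := 2 * k
  shobFinish limit
    ((PySem.List.sorted matrix.toList (fun c => c)).foldl (shobStep limit) (0, 0, ' '))

-- ===== PRECONDITION & SPEC =====
def Spec_sleight_of_hand (k : Int) (matrix : String) (out : Int) : Prop := out = sleight_of_hand_alt k matrix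
instance (k : Int) (matrix : String) (out : Int) : Decidable (Spec_sleight_of_hand k matrix out) := by unfold Spec_sleight_of_hand; infer_instance

-- ===== CLAIM (what is proved, stated in full; the proofs are below) =====
def Claim_equal_sleight_of_hand : Prop := ∀ (k : Int) (matrix : String), Dom_sleight_of_hand k matrix → Spec_sleight_of_hand k matrix (sleight_of_hand k matrix)

-- ===== LEMMAS AND PROOFS =====

-- decomposition of the "distinct chars with count ≤ limit" cardinal at a cons
theorem card_filter_cons (limit : Int) (c : Char) (t : List Char) :
    (((c :: t).toFinset.filter (fun x => (((c :: t).count x : Int)) ≤ limit)).card : Int)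
    = (if (1 + (t.count c : Int)) ≤ limit then 1 else 0)
      + (((t.toFinset.erase c).filter (fun x => ((t.count x : Int)) ≤ limit)).card : Int) := by
  have hins : (c :: t).toFinset = insert c (t.toFinset.erase c) := by
    ext x; by_cases hx : x = c <;> simp [hx]
  have hcnt : ∀ x ∈ t.toFinset.erase c, (((c :: t).count x : Int) ≤ limit) ↔ ((t.count x : Int) ≤ limit) := by
    intro x hx
    have hne : x ≠ c := Finset.ne_of_mem_erase hx
    simp [hne.symm]
  have hfc : (t.toFinset.erase c).filter (fun x => (((c :: t).count x : Int)) ≤ limit)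
      = (t.toFinset.erase c).filter (fun x => ((t.count x : Int)) ≤ limit) :=
    Finset.filter_congr hcnt
  rw [hins, Finset.filter_insert]
  have hcc : ((c :: t).count c : Int) = 1 + (t.count c : Int) := by
    rw [List.count_cons_self]; push_cast; ring
  have hnotmem : c ∉ (t.toFinset.erase c).filter (fun x => ((t.count x : Int)) ≤ limit) := by
    simp
  by_cases h : (1 + (t.count c : Int)) ≤ limit
  · rw [if_pos (by rw [hcc]; exact h), if_pos h, hfc, Finset.card_insert_of_notMem hnotmem]
    push_cast; ring
  · rw [if_neg (by rw [hcc]; exact h), if_neg h, hfc]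
    ring

-- B's loop invariant over a sorted suffix: prev's run of length 'run' is open and every
-- element still to come is ≥ prev
theorem alt_loop (limit : Int) :
    ∀ (s : List Char), s.Pairwise (· ≤ ·) →
    ∀ (prev : Char), (∀ c ∈ s, prev ≤ c) → ∀ (count run : Int), 0 < run →
    shobFinish limit (s.foldl (shobStep limit) (count, run, prev)) =
      count + (if run + (s.count prev : Int) ≤ limit then 1 else 0)
        + (((s.toFinset.erase prev).filter (fun c => ((s.count c : Int)) ≤ limit)).card : Int) := by
  intro s
  induction s with
  | nil =>
    intro _ prev _ count run hrun
    simp [shobFinish]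
    split_ifs with h1 h2 <;> simp_all
  | cons c t ih =>
    intro hpw prev hge count run hrun
    have hpt : t.Pairwise (· ≤ ·) := hpw.of_cons
    have hct : ∀ x ∈ t, c ≤ x := fun x hx => (List.pairwise_cons.mp hpw).1 x hx
    rw [List.foldl_cons]
    by_cases hc : c = prev
    · subst hc
      have hstep : shobStep limit (count, run, c) c = (count, run + 1, c) := by
        simp [shobStep, hrun]
      rw [hstep, ih hpt c hct count (run + 1) (by omega)]
      have hcc : ((c :: t).count c : Int) = (t.count c : Int) + 1 := by
        rw [List.count_cons_self]; push_cast; ring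
      have hif : (if run + 1 + (t.count c : Int) ≤ limit then (1:Int) else 0)
          = (if run + ((c :: t).count c : Int) ≤ limit then (1:Int) else 0) := by
        rw [hcc]; congr 1; simp; constructor <;> intro <;> omega
      have hset : ((c :: t).toFinset.erase c) = t.toFinset.erase c := by
        simp [List.toFinset_cons, Finset.erase_insert_eq_erase]
      have hfc : (t.toFinset.erase c).filter (fun x => ((t.count x : Int)) ≤ limit)
          = (t.toFinset.erase c).filter (fun x => (((c :: t).count x : Int)) ≤ limit) := by
        apply Finset.filter_congr
        intro x hx
        have hne : c ≠ x := (Finset.ne_of_mem_erase hx).symm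
        simp [hne]
      rw [hif, hset, hfc]
    · -- c ≠ prev : prev's run is complete and prev does not occur in c :: t
      have hpc : prev < c := lt_of_le_of_ne (hge c (List.mem_cons_self ..)) (Ne.symm hc)
      have hnm : prev ∉ c :: t := by
        intro hm
        rcases List.mem_cons.mp hm with h | h
        · exact hc h.symm
        · exact absurd (lt_of_lt_of_le hpc (hct prev h)) (lt_irrefl prev)
      have hcp0 : ((c :: t).count prev : Int) = 0 := by
        rw [List.count_eq_zero_of_not_mem hnm]; simp
      have hstep : shobStep limit (count, run, prev) c
          = ((if 0 < run ∧ run ≤ limit then count + 1 else count), 1, c) := by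
        simp [shobStep, hc]
      rw [hstep, ih hpt c hct _ 1 (by omega)]
      have herase : ((c :: t).toFinset.erase prev) = (c :: t).toFinset := by
        apply Finset.erase_eq_of_notMem
        simp only [List.toFinset_cons, Finset.mem_insert, List.mem_toFinset]
        exact fun h => hnm (h.elim (fun h1 => h1 ▸ List.mem_cons_self ..) (fun h2 => List.mem_cons_of_mem _ h2))
      rw [herase, hcp0]
      rw [card_filter_cons limit c t]
      split_ifs <;> omega

theorem countP_ofList_eq_card (xs : List Char) (p : Char → Bool) :
    (PySem.Set.ofList xs).countP p = (xs.toFinset.filter (fun c => p c = true)).card := by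
  have hnd : (PySem.Set.ofList xs).Nodup := PySem.Set.nodup_ofList xs
  have h1 : (PySem.Set.ofList xs).countP p = ((PySem.Set.ofList xs).filter p).length :=
    List.countP_eq_length_filter ..
  have h2 : ((PySem.Set.ofList xs).filter p).length = ((PySem.Set.ofList xs).filter p).toFinset.card :=
    (List.toFinset_card_of_nodup (hnd.filter p)).symm
  have h3 : ((PySem.Set.ofList xs).filter p).toFinset = (PySem.Set.ofList xs).toFinset.filter (fun c => p c = true) := by
    ext x; simp
  have h4 : (PySem.Set.ofList xs).toFinset = xs.toFinset := by
    ext x; simp [PySem.Set.mem_ofList]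
  rw [h1, h2, h3, h4]

-- A computes the number of distinct characters whose multiplicity is ≤ k*2
theorem a_eq (k : Int) (matrix : String) :
    sleight_of_hand k matrix
      = ((matrix.toList.toFinset.filter
            (fun c => ((matrix.toList.count c : Int)) ≤ k * 2)).card : Int) := by
  unfold sleight_of_hand
  have hdict : matrix.toList.foldl
      (fun d i => if d.contains i then d.modify i 0 (· + 1) else d.insert i 1)
      PySem.Dict.empty = PySem.Dict.counter matrix.toList := by
    rw [PySem.Dict.counter_eq_foldl]
    apply PySem.List.foldl_congr_mem
    intro d i _
    by_cases h : d.contains i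
    · simp [h]
    · have hgd : d.getD i 0 = 0 := PySem.Dict.getD_of_not_contains d 0 (by simpa using h)
      simp [h, PySem.Dict.modify, hgd]
  simp only [hdict]
  have hval : (PySem.Dict.counter matrix.toList).values
      = (PySem.Set.ofList matrix.toList).map (fun c => ((matrix.toList.count c : Int))) := by
    show (PySem.Dict.counter matrix.toList).items.map (·.2) = _
    rw [PySem.Dict.items_counter]
    simp [List.map_map, Function.comp]
  simp only [hval]
  rw [PySem.List.foldl_pyRange_pyGetD _ 0 (fun count v => if v ≤ k * 2 then count + 1 else count) 0 le_rfl]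
  simp only [Int.toNat_zero, List.drop_zero]
  rw [PySem.List.foldl_ite_add_one]
  rw [List.countP_map]
  rw [show ((fun x => decide (x ≤ k * 2)) ∘ fun c => ((matrix.toList.count c : Int)))
      = (fun c => decide ((matrix.toList.count c : Int) ≤ k * 2)) from rfl]
  rw [countP_ofList_eq_card matrix.toList (fun c => decide ((matrix.toList.count c : Int) ≤ k * 2))]
  simp

-- B computes the same cardinal via runs of the sorted list
theorem b_eq (k : Int) (matrix : String) :
    sleight_of_hand_alt k matrix
      = ((matrix.toList.toFinset.filter
            (fun c => ((matrix.toList.count c : Int)) ≤ 2 * k)).card : Int) := by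
  unfold sleight_of_hand_alt
  have hperm : (PySem.List.sorted matrix.toList (fun c => c)).Perm matrix.toList :=
    PySem.List.sorted_perm ..
  have hfin : (PySem.List.sorted matrix.toList (fun c => c)).toFinset = matrix.toList.toFinset :=
    List.toFinset_eq_of_perm _ _ hperm
  have hcnt : ∀ c, (PySem.List.sorted matrix.toList (fun c => c)).count c = matrix.toList.count c :=
    fun c => hperm.count_eq c
  have hgoal : ∀ (s : List Char), s.Pairwise (· ≤ ·) →
      shobFinish (2 * k) (s.foldl (shobStep (2 * k)) (0, 0, ' '))
        = ((s.toFinset.filter (fun c => ((s.count c : Int)) ≤ 2 * k)).card : Int) := by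
    intro s hpw
    cases s with
    | nil => simp [shobFinish]
    | cons c t =>
      have hct : ∀ x ∈ t, c ≤ x := fun x hx => (List.pairwise_cons.mp hpw).1 x hx
      rw [List.foldl_cons]
      have hstep : shobStep (2 * k) (0, 0, ' ') c = (0, 1, c) := by
        simp [shobStep]
      rw [hstep, alt_loop (2 * k) t hpw.of_cons c hct 0 1 one_pos, card_filter_cons]
      simp
  rw [hgoal _ (PySem.List.sorted_pairwise ..)]
  have hset : (PySem.List.sorted matrix.toList (fun c => c)).toFinset.filter
        (fun c => (((PySem.List.sorted matrix.toList (fun c => c)).count c : Int)) ≤ 2 * k)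
      = matrix.toList.toFinset.filter (fun c => ((matrix.toList.count c : Int)) ≤ 2 * k) := by
    rw [hfin]
    apply Finset.filter_congr
    intro x _
    rw [hcnt]
  rw [hset]

-- ===== VERDICT (by name: the statement is the Claim_ definition above) =====
theorem sleight_of_hand_spec : Claim_equal_sleight_of_hand := by
  intro k matrix _
  unfold Spec_sleight_of_hand
  rw [a_eq, b_eq, mul_comm]
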